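-- pv_equiv track=rewrite | github.com/ToddMG/Advent-of-Code | 2017/Day 9/solution.py | sift
-- ===== SOURCE A (Python) =====
-- def sift(stream: list[str]):
--
--     score = 0
--     depth = 0
--     skip = False
--     garbage = False
--     count = 0
--
--     for item in stream:
--         for i, c in enumerate(item):
--             if skip:
--                 skip = False
--                 continue
--             if c == '!':
--                 skip = True
--                 continue
--             elif garbage and c != '>': count += 1
--             elif c == '<': garbage = True
--             elif c == '>': garbage = False
--             elif c == '{':
--                  depth += 1
--                  score += depth
--             elif c == '}': depth -= 1
--
--     return score, count
-- ===== SOURCE B (Python) =====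
-- def sift(stream: list[str]):
--     cs = ''.join(stream)
--     # pass 1: drop cancelled pairs ('!' cancels the next character; a lone
--     # trailing '!' cancels nothing)
--     kept = []
--     i = 0
--     while i < len(cs):
--         if cs[i] == '!':
--             i += 2
--         else:
--             kept.append(cs[i])
--             i += 1
--     # pass 2: strip out garbage blocks, counting their characters
--     count = 0
--     outside = []
--     j = 0
--     n = len(kept)
--     while j < n:
--         if kept[j] == '<':
--             j += 1
--             while j < n and kept[j] != '>':
--                 count += 1
--                 j += 1
--             j += 1  # step over the closing '>'
--         else:
--             outside.append(kept[j])
--             j += 1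
--     # pass 3: score the remaining braces by depth
--     score = 0
--     depth = 0
--     for c in outside:
--         if c == '{':
--             depth += 1
--             score += depth
--         elif c == '}':
--             depth -= 1
--     return score, count
-- ===== Notes on version B (the rewrite author's own statement) =====
-- stated objective: alternative
-- what changed: A's single incremental character state machine with skip/garbage boolean flags is replaced by three independent passes over the joined stream: strip '!'-cancelled pairs, then remove garbage blocks while counting their characters, then score the remaining braces with a depth counter.
import Mathlib
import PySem

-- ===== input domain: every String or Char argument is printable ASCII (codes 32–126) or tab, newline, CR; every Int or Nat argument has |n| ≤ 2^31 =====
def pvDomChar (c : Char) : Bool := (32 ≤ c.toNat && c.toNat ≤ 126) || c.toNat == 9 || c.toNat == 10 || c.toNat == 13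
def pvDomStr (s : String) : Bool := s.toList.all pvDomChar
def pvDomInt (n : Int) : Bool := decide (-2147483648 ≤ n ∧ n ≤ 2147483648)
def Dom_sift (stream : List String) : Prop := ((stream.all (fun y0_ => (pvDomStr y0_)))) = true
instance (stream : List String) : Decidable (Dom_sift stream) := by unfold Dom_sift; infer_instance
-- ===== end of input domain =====

-- B replaces A's single-pass boolean-flag state machine by three separate passes
-- (strip cancelled '!' pairs, remove-and-count garbage, score braces); an
-- alternative decomposition with the same return value on every input.

-- ===== PORT A =====
-- state = (score, depth, skip, garbage, count), A's variables in their order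
def siftStepA (st : Int × Int × Bool × Bool × Int) (c : Char) : Int × Int × Bool × Bool × Int :=
  let (score, depth, skip, garbage, count) := st
  if skip then (score, depth, false, garbage, count)
  else if c = '!' then (score, depth, true, garbage, count)
  else if garbage && !(c = '>') then (score, depth, skip, garbage, count + 1)
  else if c = '<' then (score, depth, skip, true, count)
  else if c = '>' then (score, depth, skip, false, count)
  else if c = '{' then (score + (depth + 1), depth + 1, skip, garbage, count)
  else if c = '}' then (score, depth - 1, skip, garbage, count)
  else (score, depth, skip, garbage, count)

def sift (stream : List String) : Int × Int :=
  let st := stream.foldl (fun st item => item.toList.foldl siftStepA st) (0, 0, false, false, 0)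
  (st.1, st.2.2.2.2)

-- ===== PORT B =====
-- pass 1: drop cancelled pairs ('!' cancels the next character; a lone trailing '!' cancels nothing)
def stripBang : List Char → List Char
  | [] => []
  | c :: t =>
    if c = '!' then (match t with | [] => [] | _ :: t' => stripBang t')
    else c :: stripBang t

-- pass 2: strip out garbage blocks, counting their characters
mutual
def dropGarb : List Char → List Char × Int
  | [] => ([], 0)
  | c :: t =>
    if c = '<' then inGarb t
    else ((dropGarb t).1.cons c, (dropGarb t).2)
def inGarb : List Char → List Char × Int
  | [] => ([], 0)
  | c :: t =>
    if c = '>' then dropGarb t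
    else ((inGarb t).1, (inGarb t).2 + 1)
end

-- pass 3: score the remaining braces by depth
def scoreStep (st : Int × Int) (c : Char) : Int × Int :=
  if c = '{' then (st.1 + (st.2 + 1), st.2 + 1)
  else if c = '}' then (st.1, st.2 - 1)
  else st

def sift_alt (stream : List String) : Int × Int :=
  let cs := (PySem.Str.join "" stream).toList
  let kept := stripBang cs
  let p := dropGarb kept
  let q := p.1.foldl scoreStep (0, 0)
  (q.1, p.2)

-- ===== PRECONDITION & SPEC =====
def Spec_sift (stream : List String) (out : Int × Int) : Prop := out = sift_alt stream
instance (stream : List String) (out : Int × Int) : Decidable (Spec_sift stream out) := by unfold Spec_sift; infer_instance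

-- ===== CLAIM (what is proved, stated in full; the proofs are below) =====
def Claim_equal_sift : Prop := ∀ (stream : List String), Dom_sift stream → Spec_sift stream (sift stream)

-- ===== LEMMAS AND PROOFS =====

-- unfolding lemmas for B's recursions
theorem stripBang_nil : stripBang [] = [] := rfl
theorem stripBang_bang_nil : stripBang ['!'] = [] := rfl
theorem stripBang_bang_cons (c : Char) (t : List Char) :
    stripBang ('!' :: c :: t) = stripBang t := by
  rw [stripBang.eq_def]; simp
theorem stripBang_cons_ne {c : Char} {t : List Char} (h : ¬ c = '!') :
    stripBang (c :: t) = c :: stripBang t := by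
  rw [stripBang.eq_def]; simp [h]
theorem dropGarb_lt (t : List Char) : dropGarb ('<' :: t) = inGarb t := by
  rw [dropGarb.eq_def]; simp
theorem dropGarb_cons {c : Char} {t : List Char} (h : ¬ c = '<') :
    dropGarb (c :: t) = (c :: (dropGarb t).1, (dropGarb t).2) := by
  rw [dropGarb.eq_def]; simp [h]
theorem inGarb_gt (t : List Char) : inGarb ('>' :: t) = dropGarb t := by
  rw [inGarb.eq_def]; simp
theorem inGarb_cons {c : Char} {t : List Char} (h : ¬ c = '>') :
    inGarb (c :: t) = ((inGarb t).1, (inGarb t).2 + 1) := by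
  rw [inGarb.eq_def]; simp [h]

-- the two projections of A's final state that sift returns
def outA (st : Int × Int × Bool × Bool × Int) : Int × Int := (st.1, st.2.2.2.2)

-- main invariant: A's fold from a skip-free state equals B's composed passes
theorem sift_main : ∀ (n : Nat) (cs : List Char), cs.length ≤ n →
    ∀ (sc d k : Int) (g : Bool),
    outA (cs.foldl siftStepA (sc, d, false, g, k))
      = (let p := (if g then inGarb else dropGarb) (stripBang cs)
         ((p.1.foldl scoreStep (sc, d)).1, k + p.2)) := by
  intro n
  induction n with
  | zero =>
    intro cs hlen sc d k g
    have : cs = [] := List.length_eq_zero_iff.mp (Nat.le_zero.mp hlen)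
    subst this
    cases g <;> simp [stripBang_nil, dropGarb, inGarb, outA]
  | succ n ih =>
    intro cs hlen sc d k g
    match cs with
    | [] => cases g <;> simp [stripBang_nil, dropGarb, inGarb, outA]
    | c :: t =>
      simp only [List.length_cons, Nat.succ_le_succ_iff] at hlen
      by_cases hb : c = '!'
      · subst hb
        match t with
        | [] =>
          cases g <;> simp [stripBang_bang_nil, dropGarb, inGarb, siftStepA, outA]
        | c' :: t' =>
          have h2 : t'.length ≤ n := Nat.le_of_succ_le hlen
          have := ih t' h2 sc d k g
          simpa [stripBang_bang_cons, siftStepA] using this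
      · by_cases hg : g = true
        · subst hg
          by_cases hgt : c = '>'
          · subst hgt
            have := ih t hlen sc d k false
            simpa [stripBang_cons_ne (show ¬'>' = '!' by decide), inGarb_gt, siftStepA] using this
          · have := ih t hlen sc d (k + 1) true
            simp only [if_true] at this
            rw [List.foldl_cons,
              show siftStepA (sc, d, false, true, k) c = (sc, d, false, true, k + 1) from by
                simp [siftStepA, hb, hgt],
              this]
            simp only [if_true, stripBang_cons_ne hb, inGarb_cons hgt, Prod.mk.injEq]
            exact ⟨trivial, by omega⟩
        · have hg' : g = false := by cases g <;> simp_all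
          subst hg'
          by_cases hlt : c = '<'
          · subst hlt
            have := ih t hlen sc d k true
            simpa [stripBang_cons_ne (show ¬'<' = '!' by decide), dropGarb_lt, siftStepA] using this
          · by_cases hgt : c = '>'
            · subst hgt
              have := ih t hlen sc d k false
              simpa [stripBang_cons_ne (show ¬'>' = '!' by decide),
                dropGarb_cons (show ¬'>' = '<' by decide), siftStepA, scoreStep] using this
            · by_cases hob : c = '{'
              · subst hob
                have := ih t hlen (sc + (d + 1)) (d + 1) k false
                simpa [stripBang_cons_ne (show ¬'{' = '!' by decide),
                  dropGarb_cons (show ¬'{' = '<' by decide), siftStepA, scoreStep] using this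
              · by_cases hcb : c = '}'
                · subst hcb
                  have := ih t hlen sc (d - 1) k false
                  simpa [stripBang_cons_ne (show ¬'}' = '!' by decide),
                    dropGarb_cons (show ¬'}' = '<' by decide), siftStepA, scoreStep] using this
                · have := ih t hlen sc d k false
                  simpa [stripBang_cons_ne hb, dropGarb_cons hlt,
                    siftStepA, scoreStep, hb, hlt, hgt, hob, hcb] using this

-- A's nested per-item folds equal one fold over the concatenated characters
theorem sift_flatten (stream : List String) (st : Int × Int × Bool × Bool × Int) :
    stream.foldl (fun st item => item.toList.foldl siftStepA st) st
      = (stream.flatMap String.toList).foldl siftStepA st := by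
  induction stream generalizing st with
  | nil => rfl
  | cons s rest ih => simp [List.flatMap_cons, List.foldl_append, ih]

-- joining with the empty separator concatenates
theorem intersperse_nil_flatten : ∀ (l : List (List Char)),
    (List.intersperse ([] : List Char) l).flatten = l.flatten
  | [] => rfl
  | [x] => rfl
  | x :: y :: t => by
    show (x :: [] :: List.intersperse [] (y :: t)).flatten = _
    simp only [List.flatten_cons, List.nil_append]
    rw [intersperse_nil_flatten (y :: t)]
    simp [List.flatten_cons]

-- the joined string of B is the concatenation of the items' characters
theorem join_toList (stream : List String) :
    (PySem.Str.join "" stream).toList = stream.flatMap String.toList := by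
  simp only [PySem.Str.toList_join]
  show [].intercalate (stream.map String.toList) = _
  rw [List.intercalate, intersperse_nil_flatten]
  simp [List.flatMap]

-- ===== VERDICT (by name: the statement is the Claim_ definition above) =====
theorem sift_spec : Claim_equal_sift := by
  intro stream _
  unfold Spec_sift sift sift_alt
  rw [sift_flatten, join_toList]
  have := sift_main (stream.flatMap String.toList).length (stream.flatMap String.toList)
    (le_refl _) 0 0 0 false
  simpa [outA] using this
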